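-- pv_equiv track=rewrite | github.com/TheLokj/WizardEye | src/wizardeye/utils.py | from_charlist_to_list
-- ===== SOURCE A (Python) =====
-- from typing import Dict, Iterable, List, Optional, Set, Tuple
--
-- def from_charlist_to_list(values: Optional[List[str]], lowercase: bool = False) -> List[str]:
-- 	"""Split comma-separated values, trim spaces, drop empties, and deduplicate preserving order.
--
-- 	Args:
-- 		values (Optional[List[str]]): A list of strings, each potentially containing comma-separated values.
-- 		lowercase (bool): Whether to convert values to lowercase (default: False).
--
-- 	Returns:
-- 		List[str]: A list of unique, cleaned values.
-- 	"""
-- 	if not values: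
-- 		return []
--
-- 	normalized: List[str] = []
-- 	seen = set()
-- 	for raw_value in values:
-- 		for token in str(raw_value).split(","):
-- 			clean = token.strip()
-- 			if lowercase:
-- 				clean = clean.lower()
-- 			if not clean or clean in seen:
-- 				continue
-- 			normalized.append(clean)
-- 			seen.add(clean)
-- 	return normalized
-- ===== SOURCE B (Python) =====
-- def from_charlist_to_list(values, lowercase=False):
--     if not values:
--         return []
--     # One big string, one split: joining with the same separator we split on
--     # concatenates the per-element token streams exactly.
--     blob = ",".join(str(v) for v in values)
--     cleaned = []
--     for token in blob.split(","):
--         c = token.strip()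
--         cleaned.append(c.lower() if lowercase else c)
--     # Index of the first occurrence of every token, built once; a token is kept
--     # exactly at its first position (and if non-empty).
--     first = {}
--     for i, c in enumerate(cleaned):
--         first.setdefault(c, i)
--     return [c for i, c in enumerate(cleaned) if c and first[c] == i]
-- ===== Notes on version B (the rewrite author's own statement) =====
-- stated objective: alternative
-- what changed: B joins all inputs into one comma-separated string and splits it once instead of splitting per element, then deduplicates positionally: a first-occurrence index dict is built in one pass and a second pass keeps each non-empty token only at its first index, replacing A's fused loop that filters against a growing seen set.
import Mathlib
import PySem

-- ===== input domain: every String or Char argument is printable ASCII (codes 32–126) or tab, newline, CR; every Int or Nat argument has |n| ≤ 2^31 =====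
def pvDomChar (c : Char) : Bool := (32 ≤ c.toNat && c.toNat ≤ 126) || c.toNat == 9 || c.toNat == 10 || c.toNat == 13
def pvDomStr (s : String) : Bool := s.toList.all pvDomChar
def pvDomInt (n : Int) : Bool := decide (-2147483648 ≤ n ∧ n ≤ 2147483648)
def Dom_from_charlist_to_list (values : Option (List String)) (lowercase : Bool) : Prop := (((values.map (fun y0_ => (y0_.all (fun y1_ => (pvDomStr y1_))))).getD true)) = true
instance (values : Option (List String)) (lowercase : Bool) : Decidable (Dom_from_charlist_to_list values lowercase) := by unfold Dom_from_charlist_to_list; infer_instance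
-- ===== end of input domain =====

-- B joins the inputs into one comma string, splits it once, builds a first-occurrence
-- index dict in one pass and keeps each non-empty token exactly at its first position,
-- instead of A's fused per-element split loop with a seen set (objective: alternative).

-- Python's s.split(",") with the non-empty separator ",": split? is none only for sep = "".
def pvSplit (s : String) : List String := (PySem.Str.split? s ",").getD []

-- ===== PORT A =====
def from_charlist_to_list (values : Option (List String)) (lowercase : Bool) : List String :=
  match values with
  | none => []
  | some vs =>
    if vs.isEmpty then []
    else
      (vs.foldl (fun (st : List String × PySem.Set String) raw_value =>
          (pvSplit raw_value).foldl
            (fun (st : List String × PySem.Set String) token =>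
              let clean := PySem.Str.strip token
              let clean := if lowercase then PySem.Str.lower clean else clean
              if clean = "" ∨ PySem.Set.contains st.2 clean then st
              else (st.1 ++ [clean], PySem.Set.add st.2 clean)) st)
        ([], PySem.Set.empty)).1

-- ===== PORT B =====
def from_charlist_to_list_alt (values : Option (List String)) (lowercase : Bool) : List String :=
  match values with
  | none => []
  | some vs =>
    if vs.isEmpty then []
    else
      let blob := PySem.Str.join "," vs
      let cleaned := (pvSplit blob).map (fun token =>
        let c := PySem.Str.strip token
        if lowercase then PySem.Str.lower c else c)
      let first := (PySem.List.enumerate cleaned).foldl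
        (fun (d : PySem.Dict String Int) ic => PySem.Dict.setdefault d ic.2 ic.1)
        PySem.Dict.empty
      -- first[c] (key always present here): ported as get? = some i
      (PySem.List.enumerate cleaned).filterMap (fun ic =>
        if ic.2 ≠ "" ∧ PySem.Dict.get? first ic.2 = some ic.1
        then some ic.2 else none)

-- ===== PRECONDITION & SPEC =====
def Spec_from_charlist_to_list (values : Option (List String)) (lowercase : Bool) (out : List String) : Prop := out = from_charlist_to_list_alt values lowercase
instance (values : Option (List String)) (lowercase : Bool) (out : List String) : Decidable (Spec_from_charlist_to_list values lowercase out) := by unfold Spec_from_charlist_to_list; infer_instance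

-- ===== CLAIM (what is proved, stated in full; the proofs are below) =====
def Claim_equal_from_charlist_to_list : Prop := ∀ (values : Option (List String)) (lowercase : Bool), Dom_from_charlist_to_list values lowercase → Spec_from_charlist_to_list values lowercase (from_charlist_to_list values lowercase)

-- ===== LEMMAS AND PROOFS =====

-- Simple structural characterisation of splitting a char list at commas:
-- pvSl s = (first piece, remaining pieces).
def pvSl : List Char → List Char × List (List Char)
  | [] => ([], [])
  | c :: r => if c = ',' then ([], (pvSl r).1 :: (pvSl r).2) else (c :: (pvSl r).1, (pvSl r).2)

def pvPieces (s : List Char) : List (List Char) := (pvSl s).1 :: (pvSl s).2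

theorem pvGo_spec (fuel : Nat) : ∀ (l cur : List Char) (accs : List (List Char)),
    l.length ≤ fuel →
    PySem.Chars.splitOn.go [','] fuel l cur accs =
      accs.reverse ++ (cur.reverse ++ (pvSl l).1) :: (pvSl l).2 := by
  induction fuel with
  | zero =>
    intro l cur accs h
    have hl : l = [] := by cases l <;> simp_all
    subst hl
    simp [PySem.Chars.splitOn.go, pvSl]
  | succ n ih =>
    intro l cur accs h
    cases l with
    | nil => simp [PySem.Chars.splitOn.go, pvSl]
    | cons c rest =>
      by_cases hc : c = ','
      · subst hc
        have hpre : [','].isPrefixOf (',' :: rest) = true := by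
          simp [List.isPrefixOf]
        rw [PySem.Chars.splitOn.go, if_pos hpre]
        have := ih rest [] (cur.reverse :: accs) (by simpa using Nat.lt_succ_iff.mp (by simpa using h))
        show PySem.Chars.splitOn.go [','] n (List.drop [','].length (',' :: rest)) [] (cur.reverse :: accs) = _
        simp only [List.length_cons, List.length_nil, List.drop_succ_cons, List.drop_zero]
        rw [this]
        simp [pvSl]
      · have hpre : [','].isPrefixOf (c :: rest) = false := by
          simp [List.isPrefixOf]
          exact fun hcc => absurd hcc.symm hc
        rw [PySem.Chars.splitOn.go, if_neg (by simp [hpre])]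
        have := ih rest (c :: cur) accs (by simpa using Nat.lt_succ_iff.mp (by simpa using h))
        rw [this]
        simp [pvSl, hc]

theorem pvSplit_eq_pieces (s : String) :
    pvSplit s = (pvPieces s.toList).map String.ofList := by
  have hsep : ("," : String).toList = [','] := rfl
  have hgo := pvGo_spec (s.toList.length + 1) s.toList [] [] (by omega)
  have hlen : s.length = s.toList.length := rfl
  simp only [pvSplit, PySem.Str.split?, PySem.Chars.split?, hsep, List.isEmpty_cons,
    if_neg Bool.false_ne_true, Option.map_some, Option.getD_some, PySem.Chars.splitOn, hlen, hgo, pvPieces]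
  simp

theorem pvPieces_append (a b : List Char) :
    pvPieces (a ++ ',' :: b) = pvPieces a ++ pvPieces b := by
  induction a with
  | nil => simp [pvPieces, pvSl]
  | cons c a ih =>
    by_cases hc : c = ','
    · subst hc
      simp only [List.cons_append, pvPieces, pvSl] at ih ⊢
      have h1 := congrArg List.head? ih
      have h2 := congrArg List.tail ih
      simp at h1 h2
      simp [h1, h2]
    · simp only [List.cons_append, pvPieces, pvSl, if_neg hc] at ih ⊢
      have h1 := congrArg List.head? ih
      have h2 := congrArg List.tail ih
      simp at h1 h2
      simp [h1, h2]

theorem pvPieces_join (vs : List String) (hne : vs ≠ []) :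
    pvPieces (PySem.Chars.join [','] (vs.map String.toList)) =
      vs.flatMap (fun v => pvPieces v.toList) := by
  induction vs with
  | nil => exact absurd rfl hne
  | cons v vs ih =>
    cases vs with
    | nil => simp [PySem.Chars.join, List.intercalate]
    | cons w ws =>
      have hj : PySem.Chars.join [','] ((v :: w :: ws).map String.toList) =
          v.toList ++ ',' :: PySem.Chars.join [','] ((w :: ws).map String.toList) := by
        simp [PySem.Chars.join, List.intercalate]
      rw [hj, pvPieces_append, ih (by simp)]
      simp

theorem pvSplit_join (vs : List String) (hne : vs ≠ []) :
    pvSplit (PySem.Str.join "," vs) = vs.flatMap pvSplit := by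
  have hsep : ("," : String).toList = [','] := rfl
  have : (PySem.Str.join "," vs).toList = PySem.Chars.join [','] (vs.map String.toList) := by
    simp [PySem.Str.join]
  rw [pvSplit_eq_pieces, this, pvPieces_join vs hne]
  rw [List.flatMap_def, List.flatMap_def, List.map_flatten, List.map_map]
  congr 1
  refine List.map_congr_left (fun v _ => ?_)
  simp [pvSplit_eq_pieces]

-- A's fused filter+dedup step, on an already-cleaned token.
def pvStep (st : List String × PySem.Set String) (c : String) : List String × PySem.Set String :=
  if c = "" ∨ PySem.Set.contains st.2 c then st
  else (st.1 ++ [c], PySem.Set.add st.2 c)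

-- B's prefix-scan dedup as a recursion carrying the processed prefix.
def pvPf (p : List String) : List String → List String
  | [] => []
  | x :: xs => if x ≠ "" ∧ x ∉ p then x :: pvPf (p ++ [x]) xs else pvPf (p ++ [x]) xs

-- A's fused pass starting from state (s, s) with s matching the nonempty members of p
-- appends exactly the tokens B's prefix scan keeps.
theorem pvStep_foldl (cs : List String) : ∀ (s p : List String),
    (∀ x : String, x ≠ "" → (x ∈ s ↔ x ∈ p)) →
    cs.foldl pvStep (s, s) =
      (s ++ pvPf p cs, s ++ pvPf p cs) := by
  induction cs with
  | nil => intro s p _; simp [pvPf]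
  | cons c cs ih =>
    intro s p hsp
    by_cases hc : c = ""
    · subst hc
      have hstep : pvStep (s, s) "" = (s, s) := by simp [pvStep]
      have hiff : ∀ x : String, x ≠ "" → (x ∈ s ↔ x ∈ p ++ [""]) := by
        intro x hx; rw [hsp x hx]; simp [hx]
      simp only [List.foldl_cons, hstep, ih s (p ++ [""]) hiff, pvPf]
      simp
    · by_cases hm : c ∈ p
      · have hms : c ∈ s := (hsp c hc).mpr hm
        have hstep : pvStep (s, s) c = (s, s) := by
          simp [pvStep, PySem.Set.contains, hms]
        have hiff : ∀ x : String, x ≠ "" → (x ∈ s ↔ x ∈ p ++ [c]) := by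
          intro x hx; rw [hsp x hx]
          simp only [List.mem_append, List.mem_singleton]
          constructor
          · exact Or.inl
          · rintro (h | rfl)
            · exact h
            · exact hm
        simp only [List.foldl_cons, hstep, ih s (p ++ [c]) hiff, pvPf]
        simp [hc, hm]
      · have hms : c ∉ s := fun h => hm ((hsp c hc).mp h)
        have hstep : pvStep (s, s) c = (s ++ [c], s ++ [c]) := by
          simp [pvStep, PySem.Set.contains, hms, hc, PySem.Set.add]
        have hiff : ∀ x : String, x ≠ "" → (x ∈ s ++ [c] ↔ x ∈ p ++ [c]) := by
          intro x hx
          simp only [List.mem_append, List.mem_singleton, hsp x hx]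
        simp only [List.foldl_cons, hstep, ih (s ++ [c]) (p ++ [c]) hiff, pvPf]
        simp [hc, hm]

-- The dict built by one setdefault pass holds the first-occurrence index of each token.
theorem pvBuild_get? (c : String) (xs : List String) : ∀ (sn : Nat) (d : PySem.Dict String Int),
    PySem.Dict.get? ((PySem.List.enumerate xs (sn : Int)).foldl
        (fun (d : PySem.Dict String Int) ic => PySem.Dict.setdefault d ic.2 ic.1) d) c =
      (PySem.Dict.get? d c).or ((PySem.List.index? xs c).map (fun k => ((sn + k : Nat) : Int))) := by
  induction xs with
  | nil => intro sn d; simp [PySem.List.enumerate_nil]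
  | cons x xs ih =>
    intro sn d
    rw [PySem.List.enumerate_cons]
    have hcast : (sn : Int) + 1 = ((sn + 1 : Nat) : Int) := by push_cast; ring
    simp only [List.foldl_cons, hcast, ih (sn + 1)]
    by_cases hc : c = x
    · subst hc
      rw [PySem.Dict.get?_setdefault_self, PySem.List.index?_cons_self]
      cases hd : PySem.Dict.get? d c with
      | none => simp
      | some v => simp
    · rw [PySem.Dict.get?_setdefault_of_ne d ((sn : Nat) : Int) hc,
          PySem.List.index?_cons_of_ne xs (fun h => hc h.symm)]
      cases hi : PySem.List.index? xs c with
      | none => simp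
      | some k =>
        simp only [Option.map_some, Option.map_map]
        have : ((sn + 1 + k : Nat) : Int) = ((sn + (k + 1) : Nat) : Int) := by push_cast; ring
        simp [Function.comp, this]

-- A token sits at first-occurrence index p.length in p ++ x :: xs iff it is new.
theorem pvIndex_first (x : String) (xs : List String) (p : List String) :
    (PySem.List.index? (p ++ x :: xs) x = some p.length ↔ x ∉ p) := by
  induction p with
  | nil =>
    rw [List.nil_append, PySem.List.index?_cons_self]
    simp
  | cons a p ih =>
    by_cases ha : a = x
    · subst ha
      rw [List.cons_append, PySem.List.index?_cons_self]
      simp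
    · rw [List.cons_append, PySem.List.index?_cons_of_ne _ ha]
      constructor
      · intro h
        cases hi : PySem.List.index? (p ++ x :: xs) x with
        | none => rw [hi] at h; simp at h
        | some k =>
          rw [hi] at h
          simp only [Option.map_some, List.length_cons, Option.some.injEq] at h
          have hk : k = p.length := by omega
          subst hk
          have := ih.mp hi
          simp only [List.mem_cons, not_or]
          exact ⟨fun hxa => ha hxa.symm, this⟩
      · intro h
        have hnp : x ∉ p := fun hm => h (List.mem_cons_of_mem a hm)
        rw [ih.mpr hnp]
        simp

-- B's first-index filter is the prefix-scan recursion pvPf.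
theorem pvEnum_eq_pf (ys : List String) (F : PySem.Dict String Int)
    (HF : ∀ c, PySem.Dict.get? F c = Option.map (fun k : Nat => (k : Int)) (PySem.List.index? ys c)) :
    ∀ (xs p : List String), ys = p ++ xs →
    (PySem.List.enumerate xs (p.length : Int)).filterMap (fun ic =>
        if ic.2 ≠ "" ∧ PySem.Dict.get? F ic.2 = some ic.1
        then some ic.2 else none) = pvPf p xs := by
  intro xs
  induction xs with
  | nil => intro p _; rfl
  | cons x xs ih =>
    intro p hys
    have hcond : (PySem.Dict.get? F x = some (p.length : Int)) ↔ x ∉ p := by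
      rw [HF x, hys]
      cases hi : PySem.List.index? (p ++ x :: xs) x with
      | none =>
        have : x ∈ p ++ x :: xs := by simp
        rw [PySem.List.index?_eq_none_iff] at hi
        exact absurd this hi
      | some k =>
        simp only [Option.map_some, Option.some.injEq]
        have hIff := pvIndex_first x xs p
        rw [hi] at hIff
        rw [Nat.cast_inj]
        constructor
        · intro hk; exact hIff.mp (by rw [hk])
        · intro hnp; simpa using hIff.mpr hnp
    have hcast : (p.length : Int) + 1 = ((p ++ [x]).length : Int) := by simp
    have htail := ih (p ++ [x]) (by simpa using hys)
    rw [PySem.List.enumerate_cons]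
    simp only [List.filterMap_cons, hcast]
    by_cases h : x ≠ "" ∧ x ∉ p
    · rw [if_pos ⟨h.1, hcond.mpr h.2⟩, pvPf, if_pos h, htail]
    · have : ¬ (x ≠ "" ∧ PySem.Dict.get? F x = some (p.length : Int)) := by
        intro hcontra
        exact h ⟨hcontra.1, hcond.mp hcontra.2⟩
      rw [if_neg this, pvPf, if_neg h, htail]

-- Nested outer/inner fold of A over flattened cleaned tokens.
theorem pvOuter_foldl (cf : String → String) (vs : List String) :
    vs.foldl (fun st raw => ((pvSplit raw).map cf).foldl pvStep st) (([], []) : List String × PySem.Set String) =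
      (pvPf [] (vs.flatMap (fun raw => (pvSplit raw).map cf)),
       pvPf [] (vs.flatMap (fun raw => (pvSplit raw).map cf))) := by
  have h := pvStep_foldl (vs.flatMap (fun raw => (pvSplit raw).map cf)) [] []
    (by intro x _; rfl)
  simp only [List.nil_append] at h
  rw [← h]
  rw [List.foldl_flatMap]

-- ===== VERDICT (by name: the statement is the Claim_ definition above) =====
theorem from_charlist_to_list_spec : Claim_equal_from_charlist_to_list := by
  intro values lowercase _
  unfold Spec_from_charlist_to_list from_charlist_to_list from_charlist_to_list_alt
  cases values with
  | none => rfl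
  | some vs =>
    by_cases h : vs.isEmpty
    · simp [h]
    · have hne : vs ≠ [] := by simpa [List.isEmpty_iff] using h
      simp only [h, if_neg, Bool.false_eq_true, not_false_eq_true]
      set cf : String → String := fun token =>
        let c := PySem.Str.strip token
        if lowercase then PySem.Str.lower c else c with hcf
      have hA :
          (fun (st : List String × PySem.Set String) token =>
            let clean := PySem.Str.strip token
            let clean := if lowercase then PySem.Str.lower clean else clean
            if clean = "" ∨ PySem.Set.contains st.2 clean then st
            else (st.1 ++ [clean], PySem.Set.add st.2 clean)) =
          (fun st token => pvStep st (cf token)) := by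
        funext st token
        simp [pvStep, hcf]
      rw [hA]
      have houter : (fun (st : List String × PySem.Set String) raw_value =>
            (pvSplit raw_value).foldl (fun st token => pvStep st (cf token)) st) =
          (fun st raw_value => ((pvSplit raw_value).map cf).foldl pvStep st) := by
        funext st raw
        rw [List.foldl_map]
      have hempty : ((([] : List String), (PySem.Set.empty : PySem.Set String))) = (([], []) : List String × PySem.Set String) := rfl
      rw [houter, hempty, pvOuter_foldl cf vs]
      have hflat : (pvSplit (PySem.Str.join "," vs)).map cf =
          vs.flatMap (fun raw => (pvSplit raw).map cf) := by
        rw [pvSplit_join vs hne, List.map_flatMap]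
      rw [hflat]
      set cleaned := vs.flatMap (fun raw => (pvSplit raw).map cf) with hcl
      have HF : ∀ c, PySem.Dict.get? ((PySem.List.enumerate cleaned (((0 : Nat) : Int))).foldl
            (fun (d : PySem.Dict String Int) ic => PySem.Dict.setdefault d ic.2 ic.1)
            PySem.Dict.empty) c =
          Option.map (fun k : Nat => (k : Int)) (PySem.List.index? cleaned c) := by
        intro c
        rw [pvBuild_get? c cleaned 0 PySem.Dict.empty]
        rw [show PySem.Dict.get? (PySem.Dict.empty : PySem.Dict String Int) c = none from rfl,
          Option.none_or]
        exact Option.map_congr (fun a _ => by norm_num)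
      have := pvEnum_eq_pf cleaned _ HF cleaned [] (by simp)
      simp only [List.length_nil, Int.natCast_zero] at this
      exact this.symm
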